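-- pv_equiv track=rewrite | github.com/Pineci/ProjectEuler | Problem739.py | f_array
-- ===== SOURCE A (Python) =====
-- def f_array(sequence):
--     if len(sequence) == 1:
--         return sequence[0]
--     else:
--         sequence = sequence[1:]
--         partial_sums = []
--         for n in sequence:
--             partial_sums.append(n if len(partial_sums) == 0 else partial_sums[-1] + n)
--         return f_array(partial_sums)
-- ===== SOURCE B (Python) =====
-- def f_array(sequence):
--     # Closed form: the repeated drop-then-prefix-sum reduction is linear in the
--     # inputs with ballot-number (Catalan-triangle) weights; compute them in one pass.
--     n = len(sequence)
--     if n == 1: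
--         return sequence[0]
--     m = n - 2
--     total = 0
--     c = 1  # running binomial C(m + k, k)
--     for k in range(m + 1):
--         w = c - (c * k) // (m + 1)          # ballot number C(m+k,k) - C(m+k,k-1)
--         total += w * sequence[n - 1 - k]
--         c = (c * (m + k + 1)) // (k + 1)
--     return total
-- ===== Notes on version B (the rewrite author's own statement) =====
-- stated objective: faster
-- what changed: Replaces the O(n^2) recursive drop-then-prefix-sum reduction by the closed-form ballot-number (Catalan-triangle) weighted sum of the inputs, with the weights generated in a single multiplicative pass.
import Mathlib
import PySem

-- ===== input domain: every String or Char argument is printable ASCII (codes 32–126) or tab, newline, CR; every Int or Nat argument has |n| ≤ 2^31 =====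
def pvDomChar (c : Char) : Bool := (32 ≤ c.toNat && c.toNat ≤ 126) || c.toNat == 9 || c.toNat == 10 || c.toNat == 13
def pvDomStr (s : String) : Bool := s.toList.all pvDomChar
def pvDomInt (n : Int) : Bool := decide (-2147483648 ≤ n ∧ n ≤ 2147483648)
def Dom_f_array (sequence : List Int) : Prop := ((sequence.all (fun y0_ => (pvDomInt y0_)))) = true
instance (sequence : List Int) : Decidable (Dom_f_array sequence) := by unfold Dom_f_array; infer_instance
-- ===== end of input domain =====

-- B replaces A's O(n^2) repeated drop-then-prefix-sum recursion by a one-pass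
-- ballot-number-weighted sum of the inputs (asymptotically faster, measured).

-- ===== PORT A =====
-- the 'for n in sequence: partial_sums.append(...)' loop of A
def pyPartialSums (sequence : List Int) : List Int :=
  sequence.foldl
    (fun ps n => ps ++ [if ps.length = 0 then n else PySem.List.pyGetD ps (-1) 0 + n]) []

-- termination helper for the port of A (cited in decreasing_by)
theorem pyPartialSums_aux_length (l acc : List Int) :
    (l.foldl (fun ps n =>
      ps ++ [if ps.length = 0 then n else PySem.List.pyGetD ps (-1) 0 + n]) acc).length
      = acc.length + l.length := by
  induction l generalizing acc with
  | nil => simp [List.foldl]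
  | cons x xs ih => rw [List.foldl_cons, ih]; simp; omega

theorem pyPartialSums_length (l : List Int) : (pyPartialSums l).length = l.length := by
  simpa [pyPartialSums] using pyPartialSums_aux_length l []

def f_array (sequence : List Int) : Int :=
  if sequence.length = 1 then sequence.headI   -- sequence[0]; in range since len = 1
  else if sequence.length = 0 then 0           -- totality guard: Python A recurses forever here (excluded by Pre_)
  else f_array (pyPartialSums (PySem.List.slice sequence (some 1) none))
termination_by sequence.length
decreasing_by
  simp only [pyPartialSums_length, PySem.List.slice_from_one, List.length_tail]
  omega

-- ===== PORT B =====
def f_array_alt (sequence : List Int) : Int :=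
  let n : Int := sequence.length
  if n = 1 then sequence.headI                 -- sequence[0]; in range since len = 1
  else
    let m : Int := n - 2
    -- loop state (total, c); c is the running binomial, w the ballot-number weight
    let r := (PySem.List.pyRange 0 (m + 1) 1).foldl
      (fun (st : Int × Int) k =>
        let w := st.2 - PySem.Int.floordiv (st.2 * k) (m + 1)
        (st.1 + w * PySem.List.pyGetD sequence (n - 1 - k) 0,   -- index in range on every executed iteration
         PySem.Int.floordiv (st.2 * (m + k + 1)) (k + 1)))
      (0, 1)
    r.1

-- ===== PRECONDITION & SPEC =====
-- Pre_ excludes only the empty list, on which Python A recurses forever (RecursionError); B returns 0 there.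
def Pre_f_array (sequence : List Int) : Prop := sequence ≠ []
instance (sequence : List Int) : Decidable (Pre_f_array sequence) := by
  unfold Pre_f_array; infer_instance
def pvWitness_f_array : List Int := ([1, 2, 3])

def Spec_f_array (sequence : List Int) (out : Int) : Prop := out = f_array_alt sequence
instance (sequence : List Int) (out : Int) : Decidable (Spec_f_array sequence out) := by
  unfold Spec_f_array; infer_instance

-- ===== CLAIM (what is proved, stated in full; the proofs are below) =====
def Claim_equal_f_array : Prop := ∀ (sequence : List Int), Dom_f_array sequence → Pre_f_array sequence → Spec_f_array sequence (f_array sequence)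

-- ===== LEMMAS AND PROOFS =====

-- ballot number (Catalan-triangle entry) as an integer
def ballot (m k : Nat) : Int :=
  if k = 0 then 1 else ((m + k).choose k : Int) - ((m + k).choose (k - 1) : Int)

-- the common closed form both ports are reduced to
def specVal (s : List Int) : Int :=
  if s.length = 1 then s.headI
  else ∑ k ∈ Finset.range (s.length - 1), ballot (s.length - 2) k * s.getD (s.length - 1 - k) 0

theorem ballot_pascal (m j : Nat) :
    ballot (m + 1) (j + 1) = ballot (m + 1) j + ballot m (j + 1) := by
  cases j with
  | zero =>
    simp [ballot, Nat.choose_one_right]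
    ring
  | succ j =>
    simp only [ballot, if_neg (Nat.succ_ne_zero _), Nat.add_sub_cancel]
    have e1 : (m + 1) + (j + 1 + 1) = m + j + 3 := by omega
    have e2 : (m + 1) + (j + 1) = m + j + 2 := by omega
    have e3 : m + (j + 1 + 1) = m + j + 2 := by omega
    rw [e1, e2, e3, show j + 1 + 1 = j + 2 by omega]
    have p1 : (m + j + 3).choose (j + 2) = (m + j + 2).choose (j + 1) + (m + j + 2).choose (j + 2) := by
      rw [show m + j + 3 = (m + j + 2) + 1 by omega, show j + 2 = (j + 1) + 1 by omega]
      exact Nat.choose_succ_succ _ _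
    have p2 : (m + j + 3).choose (j + 1) = (m + j + 2).choose j + (m + j + 2).choose (j + 1) := by
      rw [show m + j + 3 = (m + j + 2) + 1 by omega]
      exact Nat.choose_succ_succ _ _
    have q1 : ((m + j + 3).choose (j + 2) : Int) = (m + j + 2).choose (j + 1) + (m + j + 2).choose (j + 2) := by
      exact_mod_cast p1
    have q2 : ((m + j + 3).choose (j + 1) : Int) = (m + j + 2).choose j + (m + j + 2).choose (j + 1) := by
      exact_mod_cast p2
    linarith [q1, q2]

theorem sum_ballot (m j : Nat) :
    ∑ k ∈ Finset.range (j + 1), ballot m k = ballot (m + 1) j := by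
  induction j with
  | zero => simp [ballot]
  | succ j ih => rw [Finset.sum_range_succ, ih, ← ballot_pascal]

theorem ballot_dup (m : Nat) : ballot (m + 1) (m + 1) = ballot (m + 1) m := by
  cases m with
  | zero => decide
  | succ m =>
    simp only [ballot, if_neg (Nat.succ_ne_zero _), Nat.add_sub_cancel]
    have e1 : (m + 1 + 1) + (m + 1 + 1) = (2 * m + 3) + 1 := by omega
    have e2 : (m + 1 + 1) + (m + 1) = 2 * m + 3 := by omega
    rw [e1, e2]
    have p1 : ((2 * m + 3) + 1).choose (m + 1 + 1) = (2 * m + 3).choose (m + 1) + (2 * m + 3).choose (m + 2) := by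
      rw [show m + 1 + 1 = (m + 1) + 1 by omega]
      rw [Nat.choose_succ_succ (2 * m + 3) (m + 1)]
    have p2 : ((2 * m + 3) + 1).choose (m + 1) = (2 * m + 3).choose m + (2 * m + 3).choose (m + 1) := by
      rw [show m + 1 = m + 1 by omega]
      exact Nat.choose_succ_succ _ _
    have hsym : (2 * m + 3).choose (m + 2) = (2 * m + 3).choose (m + 1) := by
      have h := Nat.choose_symm (show m + 1 ≤ 2 * m + 3 by omega)
      rw [show 2 * m + 3 - (m + 1) = m + 2 by omega] at h
      exact h
    have q1 : (((2 * m + 3) + 1).choose (m + 1 + 1) : Int) = (2 * m + 3).choose (m + 1) + (2 * m + 3).choose (m + 2) := by exact_mod_cast p1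
    have q2 : (((2 * m + 3) + 1).choose (m + 1) : Int) = (2 * m + 3).choose m + (2 * m + 3).choose (m + 1) := by exact_mod_cast p2
    have q3 : ((2 * m + 3).choose (m + 2) : Int) = (2 * m + 3).choose (m + 1) := by exact_mod_cast hsym
    linarith [q1, q2, q3]

-- exact division: c * (m+k+1) // (k+1) advances the running binomial
theorem choose_step (M j : Nat) :
    PySem.Int.floordiv (((M + j).choose j : Int) * ((M : Int) + j + 1)) ((j : Int) + 1)
      = ((M + j + 1).choose (j + 1) : Int) := by
  have hn : ((M + j).choose j) * (M + j + 1) = ((M + j + 1).choose (j + 1)) * (j + 1) := by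
    rw [mul_comm]
    exact Nat.add_one_mul_choose_eq (M + j) j
  have h : (((M + j).choose j : Int)) * ((M : Int) + j + 1)
      = ((M + j + 1).choose (j + 1) : Int) * ((j : Int) + 1) := by exact_mod_cast hn
  rw [h, PySem.Int.floordiv_eq_ediv_of_pos (by positivity),
      Int.mul_ediv_cancel _ (by positivity)]

-- the weight computed from the running binomial is the ballot number
theorem weight_eq (M j : Nat) :
    ((M + j).choose j : Int)
      - PySem.Int.floordiv (((M + j).choose j : Int) * (j : Int)) ((M : Int) + 1)
      = ballot M j := by
  cases j with
  | zero =>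
    simp [ballot, PySem.Int.floordiv]
  | succ j =>
    have hn : ((M + (j + 1)).choose (j + 1)) * (j + 1)
        = ((M + (j + 1)).choose j) * (M + 1) := by
      have h := Nat.choose_succ_right_eq (M + (j + 1)) j
      rw [show M + (j + 1) - j = M + 1 by omega] at h
      exact h
    have h : (((M + (j + 1)).choose (j + 1) : Int)) * ((j : Int) + 1)
        = ((M + (j + 1)).choose j : Int) * ((M : Int) + 1) := by exact_mod_cast hn
    rw [show ((j + 1 : Nat) : Int) = (j : Int) + 1 by push_cast; ring, h,
        PySem.Int.floordiv_eq_ediv_of_pos (by positivity),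
        Int.mul_ediv_cancel _ (by positivity)]
    simp [ballot]

-- loop invariant of B: after j iterations the state is (partial weighted sum, C(M+j, j))
theorem Bloop (s : List Int) (M : Nat) (j : Nat) :
    ((List.range j).map (fun k : Nat => (k : Int))).foldl
      (fun (st : Int × Int) k =>
        (st.1 + (st.2 - PySem.Int.floordiv (st.2 * k) ((M : Int) + 1))
            * PySem.List.pyGetD s ((M : Int) + 1 - k) 0,
         PySem.Int.floordiv (st.2 * ((M : Int) + k + 1)) (k + 1)))
      (0, 1)
    = (∑ k ∈ Finset.range j, ballot M k * PySem.List.pyGetD s ((M : Int) + 1 - (k : Int)) 0,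
       ((M + j).choose j : Int)) := by
  induction j with
  | zero => simp
  | succ j ih =>
    rw [List.range_succ, List.map_append, List.foldl_append, ih]
    simp only [List.map_cons, List.map_nil, List.foldl_cons, List.foldl_nil]
    rw [weight_eq M j, choose_step M j, Finset.sum_range_succ, Nat.add_assoc M j 1]

theorem B_eq (s : List Int) : f_array_alt s = specVal s := by
  cases hL : s.length with
  | zero =>
    have : s = [] := List.length_eq_zero_iff.mp hL
    subst this
    decide
  | succ L =>
    cases L with
    | zero =>
      simp [f_array_alt, specVal, hL]
    | succ M =>
      simp only [f_array_alt, specVal, hL]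
      rw [if_neg (show ((M + 1 + 1 : Nat) : Int) ≠ 1 by push_cast; omega),
          if_neg (show ¬ (M + 1 + 1 = 1) by omega),
          show ((M + 1 + 1 : Nat) : Int) = (M : Int) + 2 by push_cast; ring]
      rw [show ((M : Int) + 2 - 2 + 1) = (M : Int) + 1 by ring]
      simp only [show ∀ k : Int, (M : Int) + 2 - 1 - k = (M : Int) + 1 - k from fun k => by ring,
                 show ∀ k : Int, (M : Int) + 2 - 2 + k + 1 = (M : Int) + k + 1 from fun k => by ring]
      rw [PySem.List.pyRange_one, sub_zero, show ((M : Int) + 1).toNat = M + 1 by omega]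
      simp only [zero_add]
      rw [Bloop s M (M + 1)]
      dsimp only
      simp only [show M + 1 + 1 - 1 = M + 1 from rfl, show M + 1 + 1 - 2 = M from rfl]
      apply Finset.sum_congr rfl
      intro k hk
      have hk' : k ≤ M := by simpa [Nat.lt_succ_iff] using hk
      rw [show (M : Int) + 1 - (k : Int) = ((M + 1 - k : Nat) : Int) by omega,
          PySem.List.pyGetD_natCast]

-- an if-truncated sum over a larger range is the sum over the smaller range
theorem sum_range_ite_lt (c n : Nat) (hc : c ≤ n) (g : Nat → Int) :
    ∑ k ∈ Finset.range n, (if k < c then g k else 0) = ∑ k ∈ Finset.range c, g k := by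
  rw [← Finset.sum_subset (show Finset.range c ⊆ Finset.range n by
        intro x hx; rw [Finset.mem_range] at *; omega)
        (fun x _ hxc => if_neg (by simpa using hxc))]
  exact Finset.sum_congr rfl fun x hx => if_pos (Finset.mem_range.mp hx)

-- the heart of the equivalence: one drop-then-prefix-sum step moves the
-- ballot-weighted sum one row up the Catalan triangle
theorem key (m : Nat) (v : Nat → Int) :
    ∑ k ∈ Finset.range (m + 1), ballot m k * (∑ i ∈ Finset.range (m + 2 - k), v i)
      = ∑ k ∈ Finset.range (m + 2), ballot (m + 1) k * v (m + 1 - k) := by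
  have h1 : ∀ k ∈ Finset.range (m + 1),
      ballot m k * (∑ i ∈ Finset.range (m + 2 - k), v i)
        = ∑ i ∈ Finset.range (m + 2), (if i + k < m + 2 then ballot m k * v i else 0) := by
    intro k hk
    have hk' : k < m + 1 := Finset.mem_range.mp hk
    rw [← sum_range_ite_lt (m + 2 - k) (m + 2) (by omega) v, Finset.mul_sum]
    refine Finset.sum_congr rfl fun i _ => ?_
    rw [mul_ite, mul_zero, if_congr (show i < m + 2 - k ↔ i + k < m + 2 by omega) rfl rfl]
  rw [Finset.sum_congr rfl h1, Finset.sum_comm]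
  have h2 : ∀ i ∈ Finset.range (m + 2),
      ∑ k ∈ Finset.range (m + 1), (if i + k < m + 2 then ballot m k * v i else 0)
        = ballot (m + 1) (m + 1 - i) * v i := by
    intro i hi
    have hstep : ∀ k, (if i + k < m + 2 then ballot m k * v i else 0)
        = (if k < m + 2 - i then ballot m k else 0) * v i := by
      intro k
      rw [ite_mul, zero_mul, if_congr (show i + k < m + 2 ↔ k < m + 2 - i by omega) rfl rfl]
    rw [Finset.sum_congr rfl fun k _ => hstep k, ← Finset.sum_mul]
    congr 1
    by_cases hi0 : i = 0
    · subst hi0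
      rw [Finset.sum_congr rfl fun k hk =>
            if_pos (show k < m + 2 - 0 by have := Finset.mem_range.mp hk; omega)]
      rw [sum_ballot m m, show m + 1 - 0 = m + 1 by omega]
      exact (ballot_dup m).symm
    · have hi' : i < m + 2 := Finset.mem_range.mp hi
      rw [sum_range_ite_lt (m + 2 - i) (m + 1) (by omega) (ballot m),
          show m + 2 - i = (m + 1 - i) + 1 by omega, sum_ballot m (m + 1 - i)]
  rw [Finset.sum_congr rfl h2,
      ← Finset.sum_range_reflect (fun k => ballot (m + 1) k * v (m + 1 - k)) (m + 2)]
  refine Finset.sum_congr rfl fun j hj => ?_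
  have hj' : j ≤ m + 1 := by have := Finset.mem_range.mp hj; omega
  rw [show m + 2 - 1 - j = m + 1 - j by omega]
  congr 1
  congr 1
  omega

-- A's partial-sums loop produces exactly the list of prefix sums
theorem PS_eq (t : List Int) :
    pyPartialSums t
      = (List.range t.length).map (fun j => ∑ i ∈ Finset.range (j + 1), t.getD i 0) := by
  induction t using List.reverseRecOn with
  | nil => rfl
  | append_singleton t x ih =>
    have hfold : pyPartialSums (t ++ [x])
        = pyPartialSums t ++ [if (pyPartialSums t).length = 0 then x
            else PySem.List.pyGetD (pyPartialSums t) (-1) 0 + x] := by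
      simp [pyPartialSums, List.foldl_append]
    rw [hfold, ih]
    by_cases ht : t = []
    · subst ht
      simp
    · have hlen0 : t.length ≠ 0 := by simpa using ht
      have hne : (List.range t.length).map
          (fun j => ∑ i ∈ Finset.range (j + 1), t.getD i 0) ≠ [] := by
        simpa using hlen0
      rw [if_neg (by simpa using hlen0), PySem.List.pyGetD_neg_one _ _ hne]
      have hlast : ((List.range t.length).map
          (fun j => ∑ i ∈ Finset.range (j + 1), t.getD i 0)).getLast hne
          = ∑ i ∈ Finset.range t.length, t.getD i 0 := by
        rw [List.getLast_eq_getElem]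
        simp only [List.length_map, List.length_range, List.getElem_map, List.getElem_range]
        rw [show t.length - 1 + 1 = t.length by omega]
      rw [hlast, List.length_append, List.length_singleton, List.range_succ, List.map_append]
      congr 1
      · refine List.map_congr_left fun j hj => ?_
        have hj' : j < t.length := by simpa using hj
        refine Finset.sum_congr rfl fun i hi => ?_
        have hi' : i < t.length := by have := Finset.mem_range.mp hi; omega
        rw [List.getD_append _ _ _ _ (by omega)]
      · simp only [List.map_cons, List.map_nil]
        congr 1
        rw [Finset.sum_range_succ]
        congr 1
        · refine Finset.sum_congr rfl fun i hi => ?_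
          have hi' : i < t.length := by have := Finset.mem_range.mp hi; omega
          rw [List.getD_append _ _ _ _ (by omega)]
        · rw [List.getD_eq_getElem?_getD, List.getElem?_append_right (le_refl t.length)]
          simp

-- one reduction step of A preserves the closed form
theorem step_eq (s : List Int) (h2 : 2 ≤ s.length) :
    specVal (pyPartialSums s.tail) = specVal s := by
  obtain ⟨a, t, rfl⟩ : ∃ a t, s = a :: t := by
    cases s with
    | nil => simp at h2
    | cons a t => exact ⟨a, t, rfl⟩
  simp only [List.tail_cons]
  rw [PS_eq t]
  cases hL : t.length with
  | zero =>
    simp at h2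
    omega
  | succ L =>
    cases L with
    | zero =>
      obtain ⟨b, rfl⟩ : ∃ b, t = [b] := List.length_eq_one_iff.mp hL
      simp [specVal, ballot]
    | succ M =>
      simp only [specVal, List.length_map, List.length_range, List.length_cons, hL]
      rw [if_neg (by omega), if_neg (by omega)]
      have hlhs : ∀ k ∈ Finset.range (M + 1 + 1 - 1),
          ballot (M + 1 + 1 - 2) k
              * ((List.range (M + 1 + 1)).map
                  (fun j => ∑ i ∈ Finset.range (j + 1), t.getD i 0)).getD (M + 1 + 1 - 1 - k) 0
            = ballot M k * (∑ i ∈ Finset.range (M + 2 - k), t.getD i 0) := by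
        intro k hk
        have hk' : k < M + 1 := by simpa using hk
        rw [PySem.List.getD_map_range _ (M + 1 + 1) _ _ (by omega)]
        rw [show M + 1 + 1 - 2 = M from rfl, show M + 1 + 1 - 1 - k = M + 1 - k from rfl]
        rw [show M + 1 - k + 1 = M + 2 - k by omega]
      have hrhs : ∀ k ∈ Finset.range (M + 1 + 1 + 1 - 1),
          ballot (M + 1 + 1 + 1 - 2) k * (a :: t).getD (M + 1 + 1 + 1 - 1 - k) 0
            = ballot (M + 1) k * t.getD (M + 1 - k) 0 := by
        intro k hk
        have hk' : k < M + 2 := by have := Finset.mem_range.mp hk; omega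
        rw [show M + 1 + 1 + 1 - 2 = M + 1 from rfl, show M + 1 + 1 + 1 - 1 - k = M + 2 - k from rfl]
        rw [show M + 2 - k = (M + 1 - k) + 1 by omega, List.getD_cons_succ]
      rw [Finset.sum_congr rfl hlhs, Finset.sum_congr rfl hrhs]
      exact key M (fun i => t.getD i 0)

theorem A_eq (s : List Int) (h : s ≠ []) : f_array s = specVal s := by
  suffices H : ∀ n (s : List Int), s.length = n → s ≠ [] → f_array s = specVal s from
    H s.length s rfl h
  intro n
  induction n using Nat.strong_induction_on with
  | _ n ih =>
    intro s hlen hne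
    rw [f_array]
    by_cases h1 : s.length = 1
    · rw [if_pos h1]
      rw [specVal, if_pos h1]
    · have h0 : s.length ≠ 0 := by simpa using hne
      rw [if_neg h1, if_neg h0, PySem.List.slice_from_one]
      have hlenPS : (pyPartialSums s.tail).length = s.length - 1 := by
        rw [pyPartialSums_length, List.length_tail]
      have hnePS : pyPartialSums s.tail ≠ [] := by
        intro hc
        rw [hc] at hlenPS
        simp at hlenPS
        omega
      rw [ih (s.length - 1) (by omega) _ hlenPS hnePS]
      exact step_eq s (by omega)

-- ===== VERDICT (by name: the statement is the Claim_ definition above) =====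
theorem f_array_spec : Claim_equal_f_array := by
  intro s _ hpre
  unfold Spec_f_array
  rw [A_eq s hpre, B_eq s]
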